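-- pv_equiv track=rewrite | github.com/surtricecream/FP-project1 | FP2425P1.py | obtem_linha
-- ===== SOURCE A (Python) =====
-- def obtem_linha(tab, pos):
--     """
--     Obtem um tuplo, ordenado do menor ao maior número, com as posições que formam a linha em que está contida a posição
--
--     Arg:
--         tab (tuple): recebe um tabuleiro
--         pos (int): recebe uma posição
--
--     Return:
--         r (tuple): devolve um tuplo, ordenado do menor ao maior número, com as posições que formam a linha em que está contida a posição
--
--     """
--     l = ((pos-1) // len(tab[0])) #valor da linha
--     r = ()
--     i = 1
--     for m in tab:
--         for n in m:
--             r += (len(m)*l + i,) #somar cada posição pela ordem certa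
--             i += 1
--         return r
-- ===== SOURCE B (Python) =====
-- def obtem_linha(tab, pos):
--     # Find the row's LAST position directly: it is pos plus the distance to the next
--     # multiple of the row width, computed with the modulus (-pos) % w — no floor
--     # division, no base offset.  Then build the row recursively from that last
--     # position downwards, appending on the way back out of the recursion.
--     w = len(tab[0])
--     last = pos + (-pos) % w
--
--     def build(p, k):
--         if k == 0:
--             return ()
--         return build(p - 1, k - 1) + (p,)
--
--     return build(last, w)
-- ===== Notes on version B (the rewrite author's own statement) =====
-- stated objective: alternative
-- what changed: A walks the first row with a running counter, accumulating base+i by repeated tuple concatenation; B locates the row's LAST position directly via the modulus pos + (-pos) % w (no floor division, no counter) and builds the row recursively from that endpoint downwards, appending on the way back out of the recursion.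
import Mathlib
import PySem

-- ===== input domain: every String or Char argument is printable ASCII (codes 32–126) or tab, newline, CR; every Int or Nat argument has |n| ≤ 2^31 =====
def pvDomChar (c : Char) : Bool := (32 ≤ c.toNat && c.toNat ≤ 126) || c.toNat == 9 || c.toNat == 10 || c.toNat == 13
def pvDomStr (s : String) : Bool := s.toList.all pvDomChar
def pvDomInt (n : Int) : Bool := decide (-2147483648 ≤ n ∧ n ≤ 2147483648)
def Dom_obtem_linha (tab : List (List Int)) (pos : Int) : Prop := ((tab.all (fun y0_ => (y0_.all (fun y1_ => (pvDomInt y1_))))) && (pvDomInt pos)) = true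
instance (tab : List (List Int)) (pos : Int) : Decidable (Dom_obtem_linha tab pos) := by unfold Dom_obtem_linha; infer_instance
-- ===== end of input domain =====

-- B finds the row's last position via the modulus pos + (-pos) % w and builds the row
-- recursively from that endpoint downwards, instead of A's counter loop; objective: alternative.

-- ===== PORT A =====
-- A: l = (pos-1)//len(tab[0]); loop 'for m in tab: for n in m: r += (len(m)*l+i,); i += 1; return r'
-- returns inside the first outer iteration, so only tab[0] is processed.
def obtem_linha (tab : List (List Int)) (pos : Int) : List Int :=
  match tab with
  | [] => []        -- Python raises IndexError here; excluded by Pre_obtem_linha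
  | m :: _ =>
    let l := PySem.Int.floordiv (pos - 1) (m.length : Int)
    (m.foldl (fun (st : List Int × Int) _ =>
        (st.1 ++ [(m.length : Int) * l + st.2], st.2 + 1)) ([], 1)).1

-- ===== PORT B =====
-- B's inner helper: build(p, k) = build(p-1, k-1) + (p,)
def pvBuild (p : Int) (k : Nat) : List Int :=
  match k with
  | 0 => []
  | Nat.succ k' => pvBuild (p - 1) k' ++ [p]

-- B: w = len(tab[0]); last = pos + (-pos) % w; build(last, w)
def obtem_linha_alt (tab : List (List Int)) (pos : Int) : List Int :=
  match tab with
  | [] => []        -- Python raises IndexError here; excluded by Pre_obtem_linha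
  | m :: _ =>
    let w : Int := (m.length : Int)
    let last := pos + PySem.Int.mod (-pos) w
    pvBuild last m.length

-- ===== PRECONDITION & SPEC =====
-- Pre_ excludes exactly the inputs on which A raises: empty board (IndexError on tab[0])
-- and empty first row (ZeroDivisionError on the floor division).
def Pre_obtem_linha (tab : List (List Int)) (pos : Int) : Prop :=
  tab ≠ [] ∧ tab.headD [] ≠ []
instance (tab : List (List Int)) (pos : Int) : Decidable (Pre_obtem_linha tab pos) := by
  unfold Pre_obtem_linha; infer_instance

def pvWitness_obtem_linha : List (List Int) × Int := ([[1, 2], [3, 4]], 3)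

def Spec_obtem_linha (tab : List (List Int)) (pos : Int) (out : List Int) : Prop := out = obtem_linha_alt tab pos
instance (tab : List (List Int)) (pos : Int) (out : List Int) : Decidable (Spec_obtem_linha tab pos out) := by unfold Spec_obtem_linha; infer_instance

-- ===== CLAIM (what is proved, stated in full; the proofs are below) =====
def Claim_equal_obtem_linha : Prop := ∀ (tab : List (List Int)) (pos : Int), Dom_obtem_linha tab pos → Pre_obtem_linha tab pos → Spec_obtem_linha tab pos (obtem_linha tab pos)

-- ===== LEMMAS AND PROOFS =====

-- A's inner loop appends c + i, c + (i+1), … for the length of the list it folds over.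
lemma foldA_eq (c : Int) : ∀ (m : List Int) (acc : List Int) (i : Int),
    (m.foldl (fun (st : List Int × Int) _ => (st.1 ++ [c + st.2], st.2 + 1)) (acc, i)).1
      = acc ++ (List.range m.length).map (fun k : Nat => c + (i + (k : Int))) := by
  intro m
  induction m with
  | nil => intro acc i; simp
  | cons x xs ih =>
    intro acc i
    simp only [List.foldl_cons, ih]
    simp only [List.length_cons]
    rw [List.range_succ_eq_map]
    simp only [List.map_cons, List.map_map, List.append_assoc, Nat.cast_zero,
      List.cons_append, List.nil_append]
    congr 1
    congr 1
    · ring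
    · apply List.map_congr_left
      intro a _
      simp only [Function.comp_apply, Nat.succ_eq_add_one]
      push_cast
      ring

-- B's recursion produces the k consecutive integers ending at p.
lemma build_eq : ∀ (k : Nat) (p : Int),
    pvBuild p k = (List.range k).map (fun j : Nat => p - k + 1 + j) := by
  intro k
  induction k with
  | zero => intro p; simp [pvBuild]
  | succ k ih =>
    intro p
    rw [show pvBuild p (k + 1) = pvBuild (p - 1) k ++ [p] from rfl, ih, List.range_succ,
      List.map_append]
    congr 1
    · apply List.map_congr_left
      intro a _
      push_cast
      ring
    · simp only [List.map_cons, List.map_nil]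
      congr 1
      push_cast
      ring

-- the modulus form of the row's last position equals A's base offset plus the width
lemma last_eq (pos w : Int) (hw : 0 < w) :
    pos + PySem.Int.mod (-pos) w = w * PySem.Int.floordiv (pos - 1) w + w := by
  rw [PySem.Int.mod_eq_emod_of_pos hw, PySem.Int.floordiv_eq_ediv_of_pos hw]
  have h0 : w * ((-pos) / w) + (-pos) % w = -pos := Int.ediv_add_emod _ _
  have hr0 : 0 ≤ (-pos) % w := Int.emod_nonneg _ (ne_of_gt hw)
  have hrw : (-pos) % w < w := Int.emod_lt_of_pos _ hw
  have hdiv : (pos - 1) / w = -((-pos) / w) - 1 := by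
    have hrep : pos - 1 = (w - (-pos) % w - 1) + (-((-pos) / w) - 1) * w := by linarith
    rw [hrep, Int.add_mul_ediv_right _ _ (ne_of_gt hw),
      Int.ediv_eq_zero_of_lt (by omega) (by omega)]
    ring
  rw [hdiv]
  linarith

theorem obtem_linha_spec : Claim_equal_obtem_linha := by
  intro tab pos _ hpre
  unfold Spec_obtem_linha
  obtain ⟨hne, hrow⟩ := hpre
  cases tab with
  | nil => exact absurd rfl hne
  | cons m rest =>
    have hmlen : 0 < (m.length : Int) := by
      have : m ≠ [] := by simpa using hrow
      have := List.length_pos_of_ne_nil this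
      exact_mod_cast this
    unfold obtem_linha obtem_linha_alt
    simp only
    set l := PySem.Int.floordiv (pos - 1) (m.length : Int) with hl
    set c : Int := (m.length : Int) * l with hc
    rw [show (fun (st : List Int × Int) (_ : Int) =>
          (st.1 ++ [(m.length : Int) * l + st.2], st.2 + 1))
        = (fun (st : List Int × Int) _ => (st.1 ++ [c + st.2], st.2 + 1)) from rfl]
    rw [foldA_eq c m [] 1, build_eq, last_eq pos (m.length : Int) hmlen]
    simp only [List.nil_append]
    apply List.map_congr_left
    intro a _
    rw [hc, hl]
    ring
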